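-- pv_equiv track=rewrite | github.com/jchill-git/isnad_intrigue | helpers/utils.py | get_labeled_mentions
-- ===== SOURCE A (Python) =====
-- from typing import List, Any, Optional
--
-- def get_labeled_mentions(
--     true_isnad_mention_ids: List[List[int]],
--     true_disambiguated_ids: List[int]
-- ):
--     true_isnad_mention_ids_copy = true_isnad_mention_ids.copy()
--     mention_ids_flattened = sum(true_isnad_mention_ids, [])
--     labeled_mentions_flattened = [
--         mention_id in true_disambiguated_ids
--         for mention_id in mention_ids_flattened
--     ]
--
--     return match_list_shape(labeled_mentions_flattened, true_isnad_mention_ids_copy)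
--
-- def match_list_shape(values, list_to_match):
--     values.reverse() # treat as value stack
--     return _match_shape(values, list_to_match)
--
-- def _match_shape(value_stack, to_match):
--     """
--     Recursive helper function for match_list_shape
--     """
--     if not isinstance(to_match, list):
--         return value_stack.pop()
--
--     return [
--         _match_shape(value_stack, sub_list)
--         for sub_list in to_match
--     ]
-- ===== SOURCE B (Python) =====
-- from typing import List
--
-- def get_labeled_mentions(
--     true_isnad_mention_ids: List[List[int]],
--     true_disambiguated_ids: List[int]
-- ):
--     return [
--         [mention_id in true_disambiguated_ids for mention_id in isnad]
--         for isnad in true_isnad_mention_ids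
--     ]
-- ===== Notes on version B (the rewrite author's own statement) =====
-- stated objective: simpler
-- what changed: B builds the nested result directly with a two-level comprehension instead of flattening, reversing into a value stack and recursively rebuilding the shape.
import Mathlib
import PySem

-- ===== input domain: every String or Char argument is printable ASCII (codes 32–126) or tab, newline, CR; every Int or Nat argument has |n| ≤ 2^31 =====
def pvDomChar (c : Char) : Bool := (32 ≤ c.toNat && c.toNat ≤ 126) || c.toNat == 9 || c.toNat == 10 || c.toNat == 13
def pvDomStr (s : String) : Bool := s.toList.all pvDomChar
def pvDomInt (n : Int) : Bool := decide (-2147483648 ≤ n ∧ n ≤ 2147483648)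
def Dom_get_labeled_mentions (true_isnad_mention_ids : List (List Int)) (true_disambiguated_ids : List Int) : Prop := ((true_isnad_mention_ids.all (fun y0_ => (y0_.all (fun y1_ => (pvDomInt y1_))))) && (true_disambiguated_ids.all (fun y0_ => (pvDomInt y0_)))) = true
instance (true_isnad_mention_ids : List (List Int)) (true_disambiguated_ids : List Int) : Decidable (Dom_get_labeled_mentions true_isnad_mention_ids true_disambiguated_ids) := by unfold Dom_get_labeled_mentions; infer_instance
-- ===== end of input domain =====

-- B replaces A's flatten / reverse-into-a-stack / recursive shape rebuild with a direct
-- two-level map over the nested input (objective: simpler).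

-- ===== PORT A =====
-- one step of the list comprehension in `_match_shape` at the inner level:
-- `value_stack.pop()` (pop last; Python raises IndexError on an empty stack — unreachable
-- here, since the stack holds exactly one value per shape element)
def pvInnerStep (p : List Bool × List Bool) (_ : Int) : List Bool × List Bool :=
  match PySem.List.pop? p.2 with
  | some (v, st) => (p.1 ++ [v], st)
  | none => (p.1, p.2)

-- `_match_shape(value_stack, sub_list)` for an inner (int) list: builds the row, consuming the stack
def pvMatchShapeInner (stack : List Bool) (row : List Int) : List Bool × List Bool :=
  row.foldl pvInnerStep ([], stack)

def pvOuterStep (p : List (List Bool) × List Bool) (row : List Int) : List (List Bool) × List Bool :=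
  let q := pvMatchShapeInner p.2 row
  (p.1 ++ [q.1], q.2)

-- `_match_shape(value_stack, to_match)` at the outer level
def pvMatchShapeOuter (stack : List Bool) (rows : List (List Int)) : List (List Bool) × List Bool :=
  rows.foldl pvOuterStep ([], stack)

def get_labeled_mentions (true_isnad_mention_ids : List (List Int)) (true_disambiguated_ids : List Int) : List (List Bool) :=
  -- sum(true_isnad_mention_ids, [])
  let mention_ids_flattened := true_isnad_mention_ids.foldl (fun acc l => acc ++ l) []
  let labeled_mentions_flattened := mention_ids_flattened.map (fun m => true_disambiguated_ids.contains m)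
  -- match_list_shape: values.reverse(); _match_shape(values, shape)
  (pvMatchShapeOuter labeled_mentions_flattened.reverse true_isnad_mention_ids).1

-- ===== PORT B =====
def get_labeled_mentions_alt (true_isnad_mention_ids : List (List Int)) (true_disambiguated_ids : List Int) : List (List Bool) :=
  true_isnad_mention_ids.map (fun isnad => isnad.map (fun m => true_disambiguated_ids.contains m))

-- ===== PRECONDITION & SPEC =====
def Spec_get_labeled_mentions (true_isnad_mention_ids : List (List Int)) (true_disambiguated_ids : List Int) (out : List (List Bool)) : Prop := out = get_labeled_mentions_alt true_isnad_mention_ids true_disambiguated_ids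
instance (true_isnad_mention_ids : List (List Int)) (true_disambiguated_ids : List Int) (out : List (List Bool)) : Decidable (Spec_get_labeled_mentions true_isnad_mention_ids true_disambiguated_ids out) := by unfold Spec_get_labeled_mentions; infer_instance

-- ===== CLAIM (what is proved, stated in full; the proofs are below) =====
def Claim_equal_get_labeled_mentions : Prop := ∀ (true_isnad_mention_ids : List (List Int)) (true_disambiguated_ids : List Int), Dom_get_labeled_mentions true_isnad_mention_ids true_disambiguated_ids → Spec_get_labeled_mentions true_isnad_mention_ids true_disambiguated_ids (get_labeled_mentions true_isnad_mention_ids true_disambiguated_ids)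

-- ===== LEMMAS AND PROOFS =====

theorem pv_foldl_append (l : List (List Int)) (init : List Int) :
    l.foldl (fun acc x => acc ++ x) init = init ++ l.flatten := by
  induction l generalizing init with
  | nil => simp
  | cons a t ih => simp [List.foldl, ih, List.append_assoc]

theorem pv_inner_aux (f : Int → Bool) (row : List Int) (st acc : List Bool) :
    row.foldl pvInnerStep (acc, st ++ (row.map f).reverse) = (acc ++ row.map f, st) := by
  induction row generalizing acc with
  | nil => simp
  | cons a r ih =>
      have hst : st ++ ((a :: r).map f).reverse = (st ++ (r.map f).reverse) ++ [f a] := by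
        simp
      rw [hst]
      show r.foldl pvInnerStep (pvInnerStep (acc, (st ++ (r.map f).reverse) ++ [f a]) a) = _
      simp only [pvInnerStep, PySem.List.pop?_last]
      rw [ih (acc ++ [f a])]
      simp

theorem pv_inner (f : Int → Bool) (row : List Int) (st : List Bool) :
    pvMatchShapeInner (st ++ (row.map f).reverse) row = (row.map f, st) := by
  simpa using pv_inner_aux f row st []

theorem pv_outer_aux (f : Int → Bool) (rows : List (List Int)) (st : List Bool)
    (acc : List (List Bool)) :
    rows.foldl pvOuterStep (acc, st ++ ((rows.map (fun r => r.map f)).flatten).reverse)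
      = (acc ++ rows.map (fun r => r.map f), st) := by
  induction rows generalizing acc with
  | nil => simp
  | cons r rest ih =>
      have hst : st ++ (((r :: rest).map (fun r => r.map f)).flatten).reverse
          = (st ++ ((rest.map (fun r => r.map f)).flatten).reverse) ++ (r.map f).reverse := by
        simp
      rw [hst]
      show rest.foldl pvOuterStep (pvOuterStep (acc, _) r) = _
      simp only [pvOuterStep, pv_inner]
      rw [ih (acc ++ [r.map f])]
      simp

theorem pv_flatten_map (f : Int → Bool) (rows : List (List Int)) :
    rows.flatten.map f = (rows.map (fun r => r.map f)).flatten := by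
  simp

-- ===== VERDICT (by name: the statement is the Claim_ definition above) =====
theorem get_labeled_mentions_spec : Claim_equal_get_labeled_mentions := by
  intro tids dids _
  show get_labeled_mentions tids dids = get_labeled_mentions_alt tids dids
  unfold get_labeled_mentions get_labeled_mentions_alt pvMatchShapeOuter
  rw [pv_foldl_append, List.nil_append]
  simp only [pv_flatten_map]
  have := pv_outer_aux (fun m => dids.contains m) tids [] []
  simp only [List.nil_append] at this
  rw [this]
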